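-- pv_equiv track=rewrite | github.com/magnusdv/filtus | filtus/VariantFileReader.py | _splitGeneral
-- ===== SOURCE A (Python) =====
-- def _splitGeneral(h, variants, splitCol, sep):
--     if splitCol not in h:
--         err = "Something is wrong: Column '%s' to be split, is not among the current column names:\n\n%s" %(splitCol, ', '.join(h))
--         raise RuntimeError(err)
--     ind = h.index(splitCol)
--     counts = set(v[ind].count(sep) for v in variants)
--     maxL = max(counts) + 1
--     if len(counts) == 1:
--         for v in variants:
--             v[ind:(ind+1)] = v[ind].split(sep)
--     else:
--         for v in variants:
--             s = v[ind].split(sep)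
--             if len(s) < maxL: s.extend(['']*(maxL-len(s)))
--             v[ind:(ind+1)] = s
--     h[ind:(ind+1)] = [h[ind]+'_%d' %i for i in range(1, maxL+1)]
--     return h, variants
-- ===== SOURCE B (Python) =====
-- def _splitGeneral(h, variants, splitCol, sep):
--     if splitCol not in h:
--         err = "Something is wrong: Column '%s' to be split, is not among the current column names:\n\n%s" % (splitCol, ', '.join(h))
--         raise RuntimeError(err)
--     ind = h.index(splitCol)
--     maxL = max(v[ind].count(sep) for v in variants) + 1
--     for v in variants:
--         rest = v[ind]
--         parts = []
--         for _ in range(maxL):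
--             head, _found, rest = rest.partition(sep)
--             parts.append(head)
--         v[ind:(ind + 1)] = parts
--     h[ind:(ind + 1)] = ['%s_%d' % (splitCol, i) for i in range(1, maxL + 1)]
--     return h, variants
-- ===== Notes on version B (the rewrite author's own statement) =====
-- stated objective: alternative
-- what changed: B never calls split and never pads: it extracts exactly maxL fields per row by repeated str.partition (partitioning an exhausted remainder yields '' automatically), replacing A's set-of-counts and its two separate split-and-pad rewrite branches.
import Mathlib
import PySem

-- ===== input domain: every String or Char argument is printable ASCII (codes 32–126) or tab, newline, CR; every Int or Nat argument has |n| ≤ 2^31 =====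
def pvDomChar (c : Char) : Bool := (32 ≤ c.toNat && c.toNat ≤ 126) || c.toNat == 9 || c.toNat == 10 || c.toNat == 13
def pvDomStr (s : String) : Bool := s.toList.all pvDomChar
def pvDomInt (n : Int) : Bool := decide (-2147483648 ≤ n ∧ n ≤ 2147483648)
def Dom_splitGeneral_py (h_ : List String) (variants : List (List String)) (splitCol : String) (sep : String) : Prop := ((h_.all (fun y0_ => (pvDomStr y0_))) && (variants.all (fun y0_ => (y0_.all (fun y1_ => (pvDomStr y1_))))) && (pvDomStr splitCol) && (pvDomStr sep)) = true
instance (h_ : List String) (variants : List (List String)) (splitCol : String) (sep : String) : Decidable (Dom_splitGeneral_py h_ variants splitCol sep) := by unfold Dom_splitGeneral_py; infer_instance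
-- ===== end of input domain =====

-- B replaces A's split-then-pad (with its set of counts and two rewrite branches) by extracting exactly
-- maxL fields per row via repeated str.partition; partitioning an exhausted remainder yields '' by itself.
-- Both Pythons mutate h and variants in place identically; the theorems are about the returned value.

-- ===== PORT A =====
-- slice assignment v[ind:ind+1] = s is ported by hand as take ind ++ s ++ drop (ind+1): exact for 0 ≤ ind ≤ len.
-- The .getD defaults after index?/pyGetD/split?/max? are never used inside Pre_ (Python raises exactly where
-- those primitives return none, and Pre_ excludes that); the 'else ([], [])' arm is Python's RuntimeError.
def splitGeneral_py (h_ : List String) (variants : List (List String)) (splitCol : String) (sep : String) : List String × List (List String) :=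
  if h_.contains splitCol then
    let ind : Nat := (PySem.List.index? h_ splitCol).getD 0
    let counts : PySem.Set Nat :=
      PySem.Set.ofList (variants.map (fun v => PySem.Str.count (PySem.List.pyGetD v (ind : Int) "") sep))
    let maxL : Nat := (PySem.List.max? counts (fun c => c)).getD 0 + 1
    let newVariants : List (List String) :=
      if counts.length == 1 then
        variants.map (fun v =>
          v.take ind ++ (PySem.Str.split? (PySem.List.pyGetD v (ind : Int) "") sep).getD [] ++ v.drop (ind + 1))
      else
        variants.map (fun v =>
          let s := (PySem.Str.split? (PySem.List.pyGetD v (ind : Int) "") sep).getD []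
          let s2 := if s.length < maxL then s ++ List.replicate (maxL - s.length) "" else s
          v.take ind ++ s2 ++ v.drop (ind + 1))
    let newH : List String :=
      h_.take ind ++ (PySem.List.pyRange 1 ((maxL : Int) + 1) 1).map
        (fun i => PySem.List.pyGetD h_ (ind : Int) "" ++ "_" ++ PySem.Int.toStr i) ++ h_.drop (ind + 1)
    (newH, newVariants)
  else ([], [])

-- ===== PORT B =====
-- str.partition(sep) ported by hand (PySem has no partition): leftmost occurrence of sep, exact for sep ≠ '';
-- we keep (head, some rest) / (whole, none), B's loop uses rest.getD '' like Python's third component ''.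
def pyPartition (sep : List Char) : List Char → List Char × Option (List Char)
  | [] => ([], none)
  | c :: rest =>
    if sep.isPrefixOf (c :: rest) then ([], some (List.drop sep.length (c :: rest)))
    else
      let p := pyPartition sep rest
      (c :: p.1, p.2)

-- the inner 'for _ in range(maxL): head,_,rest = rest.partition(sep); parts.append(head)' loop
def iterPartition (sep : List Char) : Nat → List Char → List (List Char)
  | 0, _ => []
  | k + 1, cs =>
    let p := pyPartition sep cs
    p.1 :: iterPartition sep k (p.2.getD [])

def splitGeneral_py_alt (h_ : List String) (variants : List (List String)) (splitCol : String) (sep : String) : List String × List (List String) :=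
  if h_.contains splitCol then
    let ind : Nat := (PySem.List.index? h_ splitCol).getD 0
    let maxL : Nat :=
      (PySem.List.max? (variants.map (fun v => PySem.Str.count (PySem.List.pyGetD v (ind : Int) "") sep))
        (fun n => n)).getD 0 + 1
    let newVariants : List (List String) :=
      variants.map (fun v =>
        let parts := (iterPartition sep.toList maxL (PySem.List.pyGetD v (ind : Int) "").toList).map String.ofList
        v.take ind ++ parts ++ v.drop (ind + 1))
    let newH : List String :=
      h_.take ind ++ (PySem.List.pyRange 1 ((maxL : Int) + 1) 1).map
        (fun i => splitCol ++ "_" ++ PySem.Int.toStr i) ++ h_.drop (ind + 1)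
    (newH, newVariants)
  else ([], [])

-- ===== PRECONDITION & SPEC =====
-- Pre_ is exactly where the Python A returns: splitCol present (else RuntimeError), sep nonempty (else
-- ValueError from split/partition), variants nonempty (else ValueError from max(empty)), and the split
-- column index in range for every row (else IndexError).
def Pre_splitGeneral_py (h_ : List String) (variants : List (List String)) (splitCol : String) (sep : String) : Prop :=
  splitCol ∈ h_ ∧ sep ≠ "" ∧ variants ≠ [] ∧
  ∀ v ∈ variants, (PySem.List.index? h_ splitCol).getD 0 < v.length
instance (h_ : List String) (variants : List (List String)) (splitCol : String) (sep : String) : Decidable (Pre_splitGeneral_py h_ variants splitCol sep) := by unfold Pre_splitGeneral_py; infer_instance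

def pvWitness_splitGeneral_py : List String × List (List String) × String × String :=
  (["A", "B"], [["x", "a,b"], ["y", "c"]], "B", ",")

def Spec_splitGeneral_py (h_ : List String) (variants : List (List String)) (splitCol : String) (sep : String) (out : List String × List (List String)) : Prop := out = splitGeneral_py_alt h_ variants splitCol sep
instance (h_ : List String) (variants : List (List String)) (splitCol : String) (sep : String) (out : List String × List (List String)) : Decidable (Spec_splitGeneral_py h_ variants splitCol sep out) := by unfold Spec_splitGeneral_py; infer_instance

-- ===== CLAIM =====
def Claim_equal_splitGeneral_py : Prop := ∀ (h_ : List String) (variants : List (List String)) (splitCol : String) (sep : String), Dom_splitGeneral_py h_ variants splitCol sep → Pre_splitGeneral_py h_ variants splitCol sep → Spec_splitGeneral_py h_ variants splitCol sep (splitGeneral_py h_ variants splitCol sep)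

-- ===== LEMMAS AND PROOFS =====

-- list.index finds an index in range whose element is the sought one
lemma idxOf?_spec {l : List String} {x : String} (h : x ∈ l) :
    ∃ n, List.idxOf? x l = some n ∧ l.getD n "" = x ∧ n < l.length := by
  induction l with
  | nil => simp at h
  | cons a t ih =>
    by_cases hx : x = a
    · subst hx; exact ⟨0, by simp [List.idxOf?, List.findIdx?_cons], rfl, by simp⟩
    · obtain ⟨n, hn, hg, hl⟩ := ih (by simpa [hx] using h)
      refine ⟨n + 1, ?_, by simpa using hg, by simpa using hl⟩
      simp only [List.idxOf?, List.findIdx?_cons, beq_iff_eq, Ne.symm hx, if_false] at *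
      simp [hn]

-- len(s.split(sep)) = s.count(sep) + 1 for nonempty sep: the go-level invariant
lemma splitOn_go_length (sep : List Char) (hsep : sep ≠ []) :
    ∀ (fuel : Nat) (l cur : List Char) (acc : List (List Char)) (fuel' n : Nat),
      l.length ≤ fuel → l.length ≤ fuel' →
      (PySem.Chars.splitOn.go sep (fuel + 1) l cur acc).length + n
        = acc.length + 1 + PySem.Chars.count.go sep fuel' l n := by
  intro fuel
  induction fuel with
  | zero =>
    intro l cur acc fuel' n hf _
    have hl : l = [] := List.eq_nil_of_length_eq_zero (Nat.le_zero.mp hf)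
    subst hl
    cases fuel' <;> simp [PySem.Chars.splitOn.go, PySem.Chars.count.go]
  | succ fuel ih =>
    intro l cur acc fuel' n hf hg
    cases l with
    | nil =>
      cases fuel' <;> simp [PySem.Chars.splitOn.go, PySem.Chars.count.go]
    | cons c rest =>
      obtain ⟨f', rfl⟩ : ∃ f', fuel' = f' + 1 := by
        cases fuel' with
        | zero => simp at hg
        | succ f' => exact ⟨f', rfl⟩
      have hsep1 : 1 ≤ sep.length := by
        cases sep with | nil => exact absurd rfl hsep | cons _ _ => simp
      rw [PySem.Chars.splitOn.go.eq_def, PySem.Chars.count.go.eq_def]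
      simp only []
      by_cases hp : sep.isPrefixOf (c :: rest) = true
      · simp only [hp, if_true]
        have hdrop : (List.drop sep.length (c :: rest)).length ≤ fuel := by
          simp only [List.length_drop]; omega
        have hdrop' : (List.drop sep.length (c :: rest)).length ≤ f' := by
          simp only [List.length_drop]; omega
        have := ih (List.drop sep.length (c :: rest)) [] (cur.reverse :: acc) f' (n + 1) hdrop hdrop'
        simp only [List.length_cons] at this
        omega
      · simp only [hp, Bool.false_eq_true, if_false]
        have := ih rest (c :: cur) acc f' n (by simpa using hf) (by simpa using hg)
        omega

lemma length_splitOn (cs sep : List Char) (hsep : sep ≠ []) :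
    (PySem.Chars.splitOn cs sep).length = PySem.Chars.count cs sep + 1 := by
  have hempty : sep.isEmpty = false := by cases sep with | nil => exact absurd rfl hsep | cons _ _ => rfl
  have := splitOn_go_length sep hsep cs.length cs [] [] cs.length 0 le_rfl le_rfl
  simp only [List.length_nil] at this
  simp only [PySem.Chars.splitOn, PySem.Chars.count, hempty, Bool.false_eq_true, if_false]
  omega

lemma length_split_str (s sep : String) (hsep : sep ≠ "") :
    ((PySem.Str.split? s sep).getD []).length = PySem.Str.count s sep + 1 := by
  have hne : sep.toList ≠ [] := by
    intro h
    exact hsep (by simpa using congrArg String.ofList h)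
  have hempty : sep.toList.isEmpty = false := by
    cases hh : sep.toList with | nil => exact absurd hh hne | cons _ _ => rfl
  simp only [PySem.Str.split?, PySem.Chars.split?, hempty, Bool.false_eq_true, if_false,
    Option.map_some, Option.getD_some, List.length_map, PySem.Str.count_eq]
  exact length_splitOn s.toList sep.toList hne

-- PySem.List.max? with identity key is Mathlib's List.max? (on Nat)
lemma pymax_eq_max? (xs : List Nat) : PySem.List.max? xs (fun n => n) = xs.max? := by
  cases xs with
  | nil => rfl
  | cons a t =>
    show List.foldl _ (some a) t = some (t.foldl max a)
    induction t generalizing a with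
    | nil => rfl
    | cons b t ih =>
      simp only [List.foldl_cons]
      rw [← ih]
      congr 1
      by_cases h : a < b <;> simp [h, Nat.max_def] <;> omega

lemma max?_ofList (L : List Nat) {m : Nat} (hm : L.max? = some m) :
    (PySem.Set.ofList L).max? = some m := by
  rw [List.max?_eq_some_iff] at hm ⊢
  obtain ⟨hmem, hmax⟩ := hm
  exact ⟨(PySem.Set.mem_ofList L m).mpr hmem,
         fun b hb => hmax b ((PySem.Set.mem_ofList L b).mp hb)⟩

-- splitOn.go in terms of one partition step followed by splitOn of the remainder
lemma go_partition (sep : List Char) (hsep : sep ≠ []) :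
    ∀ (n fuel : Nat) (l cur : List Char) (acc : List (List Char)), l.length = n → l.length < fuel →
      PySem.Chars.splitOn.go sep fuel l cur acc =
        acc.reverse ++ ((cur.reverse ++ (pyPartition sep l).1) ::
          (match (pyPartition sep l).2 with
           | some r => PySem.Chars.splitOn r sep
           | none => ([] : List (List Char)))) := by
  intro n
  induction n using Nat.strong_induction_on with
  | _ n ih =>
    intro fuel l cur acc hn hfuel
    obtain ⟨f, rfl⟩ : ∃ f, fuel = f + 1 := by
      cases fuel with
      | zero => omega
      | succ f => exact ⟨f, rfl⟩
    cases l with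
    | nil =>
      rw [PySem.Chars.splitOn.go.eq_def]
      simp [pyPartition]
    | cons c rest =>
      have hsep1 : 1 ≤ sep.length := by
        cases sep with | nil => exact absurd rfl hsep | cons _ _ => simp
      rw [PySem.Chars.splitOn.go.eq_def]
      simp only []
      simp only [List.length_cons] at hn hfuel
      by_cases hp : sep.isPrefixOf (c :: rest) = true
      · simp only [hp, if_true]
        set d := List.drop sep.length (c :: rest) with hd
        have hdlen : d.length < n := by
          simp only [hd, List.length_drop, List.length_cons]; omega
        have h1 := ih d.length hdlen f d [] (cur.reverse :: acc) rfl
          (by simp only [hd, List.length_drop, List.length_cons]; omega)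
        have h2 := ih d.length hdlen (d.length + 1) d [] [] rfl (by omega)
        have hsplit : PySem.Chars.splitOn d sep =
            (pyPartition sep d).1 ::
              (match (pyPartition sep d).2 with
               | some r => PySem.Chars.splitOn r sep
               | none => ([] : List (List Char))) := by
          rw [PySem.Chars.splitOn, h2]; simp
        rw [h1]
        simp only [pyPartition, hp, if_true, List.reverse_cons, List.reverse_nil, List.nil_append,
          List.append_assoc, List.singleton_append]
        rw [hsplit]
        simp [hd]
      · simp only [hp, Bool.false_eq_true, if_false]
        have hrlen : rest.length < n := by omega
        rw [ih rest.length hrlen f rest (c :: cur) acc rfl (by omega)]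
        simp only [pyPartition, hp, Bool.false_eq_true, if_false, List.reverse_cons,
          List.append_assoc, List.singleton_append]

lemma splitOn_partition (cs sep : List Char) (hsep : sep ≠ []) :
    PySem.Chars.splitOn cs sep =
      (pyPartition sep cs).1 ::
        (match (pyPartition sep cs).2 with
         | some r => PySem.Chars.splitOn r sep
         | none => ([] : List (List Char))) := by
  rw [PySem.Chars.splitOn, go_partition sep hsep cs.length (cs.length + 1) cs [] [] rfl (by omega)]
  simp

lemma iterPartition_nil (sep : List Char) : ∀ k, iterPartition sep k [] = List.replicate k [] := by
  intro k
  induction k with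
  | zero => rfl
  | succ k ih => simp [iterPartition, pyPartition, ih, List.replicate_succ]

-- repeated partition = split padded with '' to length k
lemma iterPartition_eq_splitOn (sep : List Char) (hsep : sep ≠ []) :
    ∀ (k : Nat) (cs : List Char), (PySem.Chars.splitOn cs sep).length ≤ k →
      iterPartition sep k cs =
        PySem.Chars.splitOn cs sep ++ List.replicate (k - (PySem.Chars.splitOn cs sep).length) [] := by
  intro k
  induction k with
  | zero =>
    intro cs hk
    rw [splitOn_partition cs sep hsep] at hk
    simp at hk
  | succ k ih =>
    intro cs hk
    rw [splitOn_partition cs sep hsep] at hk ⊢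
    cases hp2 : (pyPartition sep cs).2 with
    | some r =>
      simp only [hp2] at hk ⊢
      have hrk : (PySem.Chars.splitOn r sep).length ≤ k := by
        simp only [List.length_cons] at hk; omega
      simp only [iterPartition, hp2, Option.getD_some, ih r hrk, List.length_cons,
        Nat.succ_sub_succ, List.cons_append]
    | none =>
      simp only [hp2] at hk ⊢
      simp [iterPartition, hp2, iterPartition_nil]

-- string-level: B's maxL-fold partition of a row equals A's split padded with '' up to maxL
lemma iter_eq_split_pad (s sep : String) (hsep : sep ≠ "") (k : Nat)
    (hk : ((PySem.Str.split? s sep).getD []).length ≤ k) :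
    (iterPartition sep.toList k s.toList).map String.ofList
      = (PySem.Str.split? s sep).getD []
        ++ List.replicate (k - ((PySem.Str.split? s sep).getD []).length) "" := by
  have hne : sep.toList ≠ [] := by
    intro h; exact hsep (by simpa using congrArg String.ofList h)
  have hempty : sep.toList.isEmpty = false := by
    cases hh : sep.toList with | nil => exact absurd hh hne | cons _ _ => rfl
  have hgetD : (PySem.Str.split? s sep).getD []
      = (PySem.Chars.splitOn s.toList sep.toList).map String.ofList := by
    simp [PySem.Str.split?, PySem.Chars.split?, hempty]
  have hlen : ((PySem.Str.split? s sep).getD []).length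
      = (PySem.Chars.splitOn s.toList sep.toList).length := by
    rw [hgetD, List.length_map]
  rw [hgetD] at hk ⊢
  simp only [List.length_map] at hk ⊢
  rw [iterPartition_eq_splitOn sep.toList hne k s.toList hk]
  simp [List.map_replicate]

-- ===== VERDICT (by name: the statement is the Claim_ definition above) =====
set_option maxHeartbeats 1000000 in
theorem splitGeneral_py_spec : Claim_equal_splitGeneral_py := by
  intro h_ variants splitCol sep _ hpre
  obtain ⟨hmem, hsep, hvne, hlen⟩ := hpre
  have hcont : h_.contains splitCol = true := List.elem_eq_true_of_mem hmem
  obtain ⟨nidx, hidx, hget, hlt⟩ := idxOf?_spec hmem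
  have hind : (PySem.List.index? h_ splitCol).getD 0 = nidx := by
    simp [PySem.List.index?, hidx]
  unfold Spec_splitGeneral_py splitGeneral_py splitGeneral_py_alt
  rw [if_pos hcont, if_pos hcont]
  simp only [hind, PySem.List.pyGetD_natCast, hget]
  have hlens : ∀ v ∈ variants,
      ((PySem.Str.split? (v.getD nidx "") sep).getD []).length
        = PySem.Str.count (v.getD nidx "") sep + 1 := fun v _ => length_split_str _ _ hsep
  obtain ⟨m, hm⟩ :
      ∃ m, (variants.map (fun v => PySem.Str.count (v.getD nidx "") sep)).max? = some m := by
    cases hLL : (variants.map (fun v => PySem.Str.count (v.getD nidx "") sep)).max? with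
    | none =>
      have := List.max?_eq_none_iff.mp hLL
      cases variants with
      | nil => exact absurd rfl hvne
      | cons a t => simp at this
    | some m => exact ⟨m, rfl⟩
  have hmA : (PySem.List.max?
        (PySem.Set.ofList (variants.map (fun v => PySem.Str.count (v.getD nidx "") sep)))
        (fun c => c)).getD 0 + 1 = m + 1 := by
    rw [pymax_eq_max?, max?_ofList _ hm]; rfl
  have hmB : (PySem.List.max?
        (variants.map (fun v => PySem.Str.count (v.getD nidx "") sep))
        (fun n => n)).getD 0 + 1 = m + 1 := by
    rw [pymax_eq_max?, hm]; rfl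
  have hle : ∀ v ∈ variants,
      ((PySem.Str.split? (v.getD nidx "") sep).getD []).length ≤ m + 1 := by
    intro v hv
    rw [hlens v hv]
    have hmemL : PySem.Str.count (v.getD nidx "") sep
        ∈ variants.map (fun v => PySem.Str.count (v.getD nidx "") sep) :=
      List.mem_map_of_mem hv
    exact Nat.succ_le_succ ((List.max?_eq_some_iff.mp hm).2 _ hmemL)
  simp only [hmA, hmB]
  refine Prod.ext rfl ?_
  -- B's row = split padded to m+1
  have hB : ∀ v ∈ variants,
      (iterPartition sep.toList (m + 1) (v.getD nidx "").toList).map String.ofList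
        = (PySem.Str.split? (v.getD nidx "") sep).getD []
          ++ List.replicate ((m + 1) - ((PySem.Str.split? (v.getD nidx "") sep).getD []).length) "" :=
    fun v hv => iter_eq_split_pad _ _ hsep _ (hle v hv)
  by_cases hone : ((PySem.Set.ofList (variants.map (fun v => PySem.Str.count (v.getD nidx "") sep))).length == 1) = true
  · -- all counts equal: every split already has length m+1, padding is empty on both sides
    simp only [hone, if_true]
    refine List.map_congr_left (fun v hv => ?_)
    have hc : PySem.Str.count (v.getD nidx "") sep = m := by
      obtain ⟨c, hc⟩ : ∃ c, PySem.Set.ofList (variants.map (fun v => PySem.Str.count (v.getD nidx "") sep)) = [c] := by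
        cases hS : PySem.Set.ofList (variants.map (fun v => PySem.Str.count (v.getD nidx "") sep)) with
        | nil => rw [hS] at hone; simp at hone
        | cons c t =>
          cases t with
          | nil => exact ⟨c, rfl⟩
          | cons d t' => rw [hS] at hone; simp at hone
      have h1 : PySem.Str.count (v.getD nidx "") sep = c := by
        have hmemL : PySem.Str.count (v.getD nidx "") sep
            ∈ variants.map (fun v => PySem.Str.count (v.getD nidx "") sep) :=
          List.mem_map_of_mem hv
        have := (PySem.Set.mem_ofList _ (PySem.Str.count (v.getD nidx "") sep)).mpr hmemL
        rw [hc] at this; simpa using this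
      have h2 : m = c := by
        have := (PySem.Set.mem_ofList _ m).mpr (List.max?_eq_some_iff.mp hm).1
        rw [hc] at this; simpa using this
      omega
    have hlenv : ((PySem.Str.split? (v.getD nidx "") sep).getD []).length = m + 1 := by
      rw [hlens v hv, hc]
    rw [hB v hv, hlenv]
    simp
  · -- general branch: A pads exactly like B's repeated partition
    simp only [hone, Bool.false_eq_true, if_false]
    refine List.map_congr_left (fun v hv => ?_)
    rw [hB v hv]
    by_cases hlt2 : ((PySem.Str.split? (v.getD nidx "") sep).getD []).length < m + 1
    · rw [if_pos hlt2]
    · have h0 : (m + 1) - ((PySem.Str.split? (v[nidx]?.getD "") sep).getD []).length = 0 := by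
        have := hle v hv
        simp only [List.getD_eq_getElem?_getD] at this hlt2
        omega
      rw [if_neg hlt2]; simp [h0]
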